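-- pv_equiv track=rewrite | github.com/Soldier0x0/JupiterV1Alpha | backend/cybersecurity_frameworks.py | _determine_phase
-- ===== SOURCE A (Python) =====
-- from typing import Dict, List, Any, Optional, Tuple
--
-- def _determine_phase(activity: str, log_data: Dict[str, Any]) -> str:
--     """Determine Diamond Model phase based on activity"""
--     activity_lower = activity.lower()
--
--     if any(keyword in activity_lower for keyword in ['scan', 'probe', 'reconnaissance']):
--         return "Reconnaissance"
--     elif any(keyword in activity_lower for keyword in ['malware', 'payload', 'exploit']):
--         return "Weaponization"
--     elif any(keyword in activity_lower for keyword in ['email', 'download', 'attachment']):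
--         return "Delivery"
--     elif any(keyword in activity_lower for keyword in ['exploit', 'vulnerability', 'buffer']):
--         return "Exploitation"
--     elif any(keyword in activity_lower for keyword in ['install', 'persist', 'backdoor']):
--         return "Installation"
--     elif any(keyword in activity_lower for keyword in ['command', 'control', 'c2', 'beacon']):
--         return "Command and Control"
--     elif any(keyword in activity_lower for keyword in ['exfiltrate', 'steal', 'data']):
--         return "Actions on Objectives"
--     else:
--         return "Unknown"
-- ===== SOURCE B (Python) =====
-- # Different strategy: instead of testing phase groups in order with early return,
-- # index every keyword by its phase priority in one flat dict, scan all keywords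
-- # once, and keep the match with the smallest priority.
-- # 'exploit' appears in two phases in the spec; the earlier one (Weaponization)
-- # always wins, so it is entered with that priority.
-- _KW_PHASE = {
--     'scan': (0, "Reconnaissance"),
--     'probe': (0, "Reconnaissance"),
--     'reconnaissance': (0, "Reconnaissance"),
--     'malware': (1, "Weaponization"),
--     'payload': (1, "Weaponization"),
--     'exploit': (1, "Weaponization"),
--     'email': (2, "Delivery"),
--     'download': (2, "Delivery"),
--     'attachment': (2, "Delivery"),
--     'vulnerability': (3, "Exploitation"),
--     'buffer': (3, "Exploitation"),
--     'install': (4, "Installation"),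
--     'persist': (4, "Installation"),
--     'backdoor': (4, "Installation"),
--     'command': (5, "Command and Control"),
--     'control': (5, "Command and Control"),
--     'c2': (5, "Command and Control"),
--     'beacon': (5, "Command and Control"),
--     'exfiltrate': (6, "Actions on Objectives"),
--     'steal': (6, "Actions on Objectives"),
--     'data': (6, "Actions on Objectives"),
-- }
--
-- def _determine_phase(activity, log_data):
--     low = activity.lower()
--     best = None
--     for kw, (prio, phase) in _KW_PHASE.items():
--         if kw in low and (best is None or prio < best[0]):
--             best = (prio, phase)
--     return best[1] if best is not None else "Unknown"
-- ===== Notes on version B (the rewrite author's own statement) =====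
-- stated objective: alternative
-- what changed: Replaces the ordered seven-branch if-elif cascade (early return on the first matching group) with a flat keyword->(priority, phase) index scanned in a single min-tracking pass that keeps the lowest-priority match.
import Mathlib
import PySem

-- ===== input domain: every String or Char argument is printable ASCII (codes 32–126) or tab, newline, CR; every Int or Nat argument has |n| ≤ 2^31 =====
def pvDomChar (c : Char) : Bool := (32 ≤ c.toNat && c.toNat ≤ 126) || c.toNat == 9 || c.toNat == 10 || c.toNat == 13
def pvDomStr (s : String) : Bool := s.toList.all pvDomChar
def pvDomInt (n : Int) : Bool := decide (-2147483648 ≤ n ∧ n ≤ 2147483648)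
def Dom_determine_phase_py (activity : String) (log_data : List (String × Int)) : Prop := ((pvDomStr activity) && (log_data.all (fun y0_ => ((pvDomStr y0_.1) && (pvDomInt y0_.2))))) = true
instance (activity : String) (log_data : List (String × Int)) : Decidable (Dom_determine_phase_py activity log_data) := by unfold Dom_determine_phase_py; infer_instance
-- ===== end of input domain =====

-- B changes: A's ordered if-elif cascade with early return is replaced by a flat
-- keyword → (priority, phase) index scanned in one min-tracking pass; objective: alternative.

-- ===== PORT A =====
def determine_phase_py (activity : String) (_log_data : List (String × Int)) : String :=
  let activity_lower := PySem.Str.lower activity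
  if (["scan", "probe", "reconnaissance"].any (fun keyword => PySem.Str.isIn keyword activity_lower)) then
    "Reconnaissance"
  else if (["malware", "payload", "exploit"].any (fun keyword => PySem.Str.isIn keyword activity_lower)) then
    "Weaponization"
  else if (["email", "download", "attachment"].any (fun keyword => PySem.Str.isIn keyword activity_lower)) then
    "Delivery"
  else if (["exploit", "vulnerability", "buffer"].any (fun keyword => PySem.Str.isIn keyword activity_lower)) then
    "Exploitation"
  else if (["install", "persist", "backdoor"].any (fun keyword => PySem.Str.isIn keyword activity_lower)) then
    "Installation"
  else if (["command", "control", "c2", "beacon"].any (fun keyword => PySem.Str.isIn keyword activity_lower)) then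
    "Command and Control"
  else if (["exfiltrate", "steal", "data"].any (fun keyword => PySem.Str.isIn keyword activity_lower)) then
    "Actions on Objectives"
  else
    "Unknown"

-- ===== PORT B =====
-- the literal _KW_PHASE dict of Source B, in insertion order
def kwPhaseTable : List (String × Int × String) :=
  [ ("scan", (0 : Int), "Reconnaissance"),
    ("probe", (0 : Int), "Reconnaissance"),
    ("reconnaissance", (0 : Int), "Reconnaissance"),
    ("malware", (1 : Int), "Weaponization"),
    ("payload", (1 : Int), "Weaponization"),
    ("exploit", (1 : Int), "Weaponization"),
    ("email", (2 : Int), "Delivery"),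
    ("download", (2 : Int), "Delivery"),
    ("attachment", (2 : Int), "Delivery"),
    ("vulnerability", (3 : Int), "Exploitation"),
    ("buffer", (3 : Int), "Exploitation"),
    ("install", (4 : Int), "Installation"),
    ("persist", (4 : Int), "Installation"),
    ("backdoor", (4 : Int), "Installation"),
    ("command", (5 : Int), "Command and Control"),
    ("control", (5 : Int), "Command and Control"),
    ("c2", (5 : Int), "Command and Control"),
    ("beacon", (5 : Int), "Command and Control"),
    ("exfiltrate", (6 : Int), "Actions on Objectives"),
    ("steal", (6 : Int), "Actions on Objectives"),
    ("data", (6 : Int), "Actions on Objectives") ]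

def determine_phase_py_alt (activity : String) (_log_data : List (String × Int)) : String :=
  let low := PySem.Str.lower activity
  let best := kwPhaseTable.foldl
    (fun best kv =>
      if PySem.Str.isIn kv.1 low &&
          (match best with
           | none => true
           | some b => decide (kv.2.1 < b.1)) then
        some (kv.2.1, kv.2.2)
      else best)
    (none : Option (Int × String))
  match best with
  | some b => b.2
  | none => "Unknown"

-- ===== PRECONDITION & SPEC =====
def Spec_determine_phase_py (activity : String) (log_data : List (String × Int)) (out : String) : Prop := out = determine_phase_py_alt activity log_data
instance (activity : String) (log_data : List (String × Int)) (out : String) : Decidable (Spec_determine_phase_py activity log_data out) := by unfold Spec_determine_phase_py; infer_instance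

-- ===== CLAIM (what is proved, stated in full; the proofs are below) =====
def Claim_equal_determine_phase_py : Prop := ∀ (activity : String) (log_data : List (String × Int)), Dom_determine_phase_py activity log_data → Spec_determine_phase_py activity log_data (determine_phase_py activity log_data)

-- ===== LEMMAS AND PROOFS =====

-- ===== VERDICT (by name: the statement is the Claim_ definition above) =====
set_option maxHeartbeats 2000000 in
theorem determine_phase_py_spec : Claim_equal_determine_phase_py := by
  intro activity log_data _
  simp only [Spec_determine_phase_py, determine_phase_py, determine_phase_py_alt, kwPhaseTable]
  by_cases h1 : PySem.Chars.isIn ['s', 'c', 'a', 'n'] (PySem.Chars.lower activity.toList) = true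
  · simp [h1]
  by_cases h2 : PySem.Chars.isIn ['p', 'r', 'o', 'b', 'e'] (PySem.Chars.lower activity.toList) = true
  · simp [h1, h2]
  by_cases h3 : PySem.Chars.isIn ['r', 'e', 'c', 'o', 'n', 'n', 'a', 'i', 's', 's', 'a', 'n', 'c', 'e'] (PySem.Chars.lower activity.toList) = true
  · simp [h1, h2, h3]
  by_cases h4 : PySem.Chars.isIn ['m', 'a', 'l', 'w', 'a', 'r', 'e'] (PySem.Chars.lower activity.toList) = true
  · simp [h1, h2, h3, h4]
  by_cases h5 : PySem.Chars.isIn ['p', 'a', 'y', 'l', 'o', 'a', 'd'] (PySem.Chars.lower activity.toList) = true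
  · simp [h1, h2, h3, h4, h5]
  by_cases h6 : PySem.Chars.isIn ['e', 'x', 'p', 'l', 'o', 'i', 't'] (PySem.Chars.lower activity.toList) = true
  · simp [h1, h2, h3, h4, h5, h6]
  by_cases h7 : PySem.Chars.isIn ['e', 'm', 'a', 'i', 'l'] (PySem.Chars.lower activity.toList) = true
  · simp [h1, h2, h3, h4, h5, h6, h7]
  by_cases h8 : PySem.Chars.isIn ['d', 'o', 'w', 'n', 'l', 'o', 'a', 'd'] (PySem.Chars.lower activity.toList) = true
  · simp [h1, h2, h3, h4, h5, h6, h7, h8]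
  by_cases h9 : PySem.Chars.isIn ['a', 't', 't', 'a', 'c', 'h', 'm', 'e', 'n', 't'] (PySem.Chars.lower activity.toList) = true
  · simp [h1, h2, h3, h4, h5, h6, h7, h8, h9]
  by_cases h10 : PySem.Chars.isIn ['v', 'u', 'l', 'n', 'e', 'r', 'a', 'b', 'i', 'l', 'i', 't', 'y'] (PySem.Chars.lower activity.toList) = true
  · simp [h1, h2, h3, h4, h5, h6, h7, h8, h9, h10]
  by_cases h11 : PySem.Chars.isIn ['b', 'u', 'f', 'f', 'e', 'r'] (PySem.Chars.lower activity.toList) = true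
  · simp [h1, h2, h3, h4, h5, h6, h7, h8, h9, h10, h11]
  by_cases h12 : PySem.Chars.isIn ['i', 'n', 's', 't', 'a', 'l', 'l'] (PySem.Chars.lower activity.toList) = true
  · simp [h1, h2, h3, h4, h5, h6, h7, h8, h9, h10, h11, h12]
  by_cases h13 : PySem.Chars.isIn ['p', 'e', 'r', 's', 'i', 's', 't'] (PySem.Chars.lower activity.toList) = true
  · simp [h1, h2, h3, h4, h5, h6, h7, h8, h9, h10, h11, h12, h13]
  by_cases h14 : PySem.Chars.isIn ['b', 'a', 'c', 'k', 'd', 'o', 'o', 'r'] (PySem.Chars.lower activity.toList) = true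
  · simp [h1, h2, h3, h4, h5, h6, h7, h8, h9, h10, h11, h12, h13, h14]
  by_cases h15 : PySem.Chars.isIn ['c', 'o', 'm', 'm', 'a', 'n', 'd'] (PySem.Chars.lower activity.toList) = true
  · simp [h1, h2, h3, h4, h5, h6, h7, h8, h9, h10, h11, h12, h13, h14, h15]
  by_cases h16 : PySem.Chars.isIn ['c', 'o', 'n', 't', 'r', 'o', 'l'] (PySem.Chars.lower activity.toList) = true
  · simp [h1, h2, h3, h4, h5, h6, h7, h8, h9, h10, h11, h12, h13, h14, h15, h16]
  by_cases h17 : PySem.Chars.isIn ['c', '2'] (PySem.Chars.lower activity.toList) = true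
  · simp [h1, h2, h3, h4, h5, h6, h7, h8, h9, h10, h11, h12, h13, h14, h15, h16, h17]
  by_cases h18 : PySem.Chars.isIn ['b', 'e', 'a', 'c', 'o', 'n'] (PySem.Chars.lower activity.toList) = true
  · simp [h1, h2, h3, h4, h5, h6, h7, h8, h9, h10, h11, h12, h13, h14, h15, h16, h17, h18]
  by_cases h19 : PySem.Chars.isIn ['e', 'x', 'f', 'i', 'l', 't', 'r', 'a', 't', 'e'] (PySem.Chars.lower activity.toList) = true
  · simp [h1, h2, h3, h4, h5, h6, h7, h8, h9, h10, h11, h12, h13, h14, h15, h16, h17, h18, h19]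
  by_cases h20 : PySem.Chars.isIn ['s', 't', 'e', 'a', 'l'] (PySem.Chars.lower activity.toList) = true
  · simp [h1, h2, h3, h4, h5, h6, h7, h8, h9, h10, h11, h12, h13, h14, h15, h16, h17, h18, h19, h20]
  by_cases h21 : PySem.Chars.isIn ['d', 'a', 't', 'a'] (PySem.Chars.lower activity.toList) = true
  · simp [h1, h2, h3, h4, h5, h6, h7, h8, h9, h10, h11, h12, h13, h14, h15, h16, h17, h18, h19, h20, h21]
  simp [h1, h2, h3, h4, h5, h6, h7, h8, h9, h10, h11, h12, h13, h14, h15, h16, h17, h18, h19, h20, h21]
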